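-- pv_equiv track=rewrite | github.com/mtakeshi1/advent2023 | week2/d14.py | tilt_north_col
-- ===== SOURCE A (Python) =====
-- def tilt_north_col(input: list[str], column: int) -> tuple[int, str]:
--     top = 0
--     load = 0
--     rows = len(input)
--     col = [input[c][column] for c in range(rows)]
--     for i in range(len(input)):
--         match input[i][column]:
--             case 'O':
--                 col[i] = '.'
--                 col[top] = 'O'
--                 load += rows - top
--                 top = top + 1
--             case '#':
--                 top = i + 1
--     return load, ''.join(col)
-- ===== SOURCE B (Python) =====
-- def tilt_north_col(input: list[str], column: int) -> tuple[int, str]: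
--     rows = len(input)
--     col = ''.join(row[column] for row in input)
--     parts = []
--     for seg in col.split('#'):
--         k = seg.count('O')
--         parts.append('O' * k + ''.join('.' if ch == 'O' else ch for ch in seg[k:]))
--     out = '#'.join(parts)
--     load = sum(rows - i for i, ch in enumerate(out) if ch == 'O')
--     return load, out
-- ===== Notes on version B (the rewrite author's own statement) =====
-- stated objective: alternative
-- what changed: A simulates the tilt in place (two index writes into a mutable column plus a running top/load state per row); B splits the column string on '#', rebuilds each segment as its O-count front followed by its remaining chars (O's turned to '.'), rejoins with '#', and computes the load in a separate enumeration pass over the result.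
import Mathlib
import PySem

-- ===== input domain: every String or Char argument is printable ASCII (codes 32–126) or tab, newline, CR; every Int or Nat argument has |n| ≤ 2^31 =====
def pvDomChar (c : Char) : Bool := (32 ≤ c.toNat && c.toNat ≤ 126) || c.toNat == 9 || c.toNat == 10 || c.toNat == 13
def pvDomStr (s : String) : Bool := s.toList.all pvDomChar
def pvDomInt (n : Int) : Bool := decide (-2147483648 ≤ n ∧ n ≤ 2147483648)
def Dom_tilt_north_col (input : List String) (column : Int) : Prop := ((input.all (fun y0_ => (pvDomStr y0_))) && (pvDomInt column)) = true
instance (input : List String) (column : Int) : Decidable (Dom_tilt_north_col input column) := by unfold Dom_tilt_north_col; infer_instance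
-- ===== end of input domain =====

set_option maxRecDepth 8192


-- B replaces A's index-juggling in-place simulation (two writes per 'O' into a mutable
-- column plus a running top/load state) by a split-on-'#' segment rebuild and a separate
-- enumeration pass for the load; same return value (alternative decomposition, not claimed faster).

-- ===== PORT A =====
def tilt_north_col (input : List String) (column : Int) : Int × String :=
  let rows : Int := input.length
  -- col = [input[c][column] for c in range(rows)]  (index always in range for input[c];
  -- input[c][column] can raise IndexError — excluded by Pre_; ' ' is an arbitrary default there)
  let col : List Char :=
    (PySem.List.pyRange 0 rows).map
      (fun c => (PySem.Str.pyGet? (PySem.List.pyGetD input c "") column).getD ' ')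
  let s :=
    (PySem.List.pyRange 0 rows).foldl
      (fun (st : Int × Int × List Char) i =>
        let ch := (PySem.Str.pyGet? (PySem.List.pyGetD input i "") column).getD ' '
        if ch = 'O' then
          (st.1 + 1, st.2.1 + (rows - st.1),
           PySem.List.pySetD (PySem.List.pySetD st.2.2 i '.') st.1 'O')
        else if ch = '#' then (i + 1, st.2.1, st.2.2)
        else st)
      (0, 0, col)
  (s.2.1, String.mk s.2.2)

-- ===== PORT B =====
def tilt_north_col_alt (input : List String) (column : Int) : Int × String :=
  let rows : Int := input.length
  let col : List Char := input.map (fun row => (PySem.Str.pyGet? row column).getD ' ')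
  -- col.split('#') on a single-char separator is List.splitOn; seg.count('O') is List.count
  let parts : List (List Char) :=
    (col.splitOn '#').foldl
      (fun acc seg =>
        let k := seg.count 'O'
        acc ++ [List.replicate k 'O' ++ (seg.drop k).map (fun ch => if ch = 'O' then '.' else ch)])
      []
  let out := PySem.Chars.join ['#'] parts
  let load :=
    (PySem.List.enumerate out).foldl
      (fun (acc : Int) p => if p.2 = 'O' then acc + (rows - p.1) else acc) 0
  (load, String.mk out)

-- ===== PRECONDITION & SPEC =====
-- Pre_ excludes exactly the inputs where A raises IndexError: some row too short for `column`.
def Pre_tilt_north_col (input : List String) (column : Int) : Prop :=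
  ∀ s ∈ input, PySem.Raise.InRange s.toList.length column
instance (input : List String) (column : Int) : Decidable (Pre_tilt_north_col input column) := by
  unfold Pre_tilt_north_col; infer_instance
def pvWitness_tilt_north_col : List String × Int := (["O.", "..", "#O", "O."], 0)

def Spec_tilt_north_col (input : List String) (column : Int) (out : Int × String) : Prop := out = tilt_north_col_alt input column
instance (input : List String) (column : Int) (out : Int × String) : Decidable (Spec_tilt_north_col input column out) := by unfold Spec_tilt_north_col; infer_instance

-- ===== CLAIM (what is proved, stated in full; the proofs are below) =====
def Claim_equal_tilt_north_col : Prop := ∀ (input : List String) (column : Int), Dom_tilt_north_col input column → Pre_tilt_north_col input column → Spec_tilt_north_col input column (tilt_north_col input column)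

-- ===== LEMMAS AND PROOFS =====

def pvSub (c : Char) : Char := if c = 'O' then '.' else c

def pvNorm (s : List Char) : List Char :=
  List.replicate (s.count 'O') 'O' ++ (s.drop (s.count 'O')).map pvSub

def pvTilt (cs : List Char) : List Char :=
  PySem.Chars.join ['#'] ((cs.splitOn '#').map pvNorm)

def pvTl (cs : List Char) : List Char :=
  match cs.dropWhile (· ≠ '#') with
  | [] => []
  | _ :: r => '#' :: pvTilt r

-- unified denotation of A's loop: state (k = 'O's stacked at the front of the current
-- segment, pend = the already-processed rest of the current segment, start = absolute
-- index where the current segment begins); returns (final top, load, tilted suffix)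
def pvMid (n : Nat) : List Char → Nat → List Char → Nat → Int → Nat × Int × List Char
  | [], k, pend, start, load => (start + k, load, List.replicate k 'O' ++ pend)
  | c :: rest, k, pend, start, load =>
    if c = 'O' then
      pvMid n rest (k + 1) ((pend ++ ['.']).tail) start (load + ((n : Int) - ((start + k : Nat) : Int)))
    else if c = '#' then
      let r := pvMid n rest 0 [] (start + k + pend.length + 1) load
      (r.1, r.2.1, List.replicate k 'O' ++ pend ++ '#' :: r.2.2)
    else
      pvMid n rest k (pend ++ [c]) start load

def pvLoad (n : Nat) (off : Int) (l : List Char) : Int :=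
  ((PySem.List.enumerate l off).map (fun p => if p.2 = 'O' then (n : Int) - p.1 else 0)).sum

def pvStepA (input : List String) (column : Int) (n : Nat)
    (st : Int × Int × List Char) (j : Nat) : Int × Int × List Char :=
  let ch := (PySem.Str.pyGet? (PySem.List.pyGetD input ((j : Nat) : Int) "") column).getD ' '
  if ch = 'O' then
    (st.1 + 1, st.2.1 + ((n : Int) - st.1),
     PySem.List.pySetD (PySem.List.pySetD st.2.2 ((j : Nat) : Int) '.') st.1 'O')
  else if ch = '#' then (((j : Nat) : Int) + 1, st.2.1, st.2.2)
  else st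

theorem pv_splitOn_eq (cs : List Char) :
    cs.splitOn '#' = cs.takeWhile (· ≠ '#') ::
      (match cs.dropWhile (· ≠ '#') with | [] => [] | _ :: r => r.splitOn '#') := by
  induction cs with
  | nil => simp [List.splitOn, List.splitOnP_nil]
  | cons c cs ih =>
    by_cases hc : c = '#'
    · subst hc
      simp [List.splitOn, List.splitOnP_cons, List.takeWhile_cons, List.dropWhile_cons]
    · have hTW : (c :: cs).takeWhile (· ≠ '#') = c :: cs.takeWhile (· ≠ '#') := by
        simp [List.takeWhile_cons, hc]
      have hDW : (c :: cs).dropWhile (· ≠ '#') = cs.dropWhile (· ≠ '#') := by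
        simp [List.dropWhile_cons, hc]
      have : (c :: cs).splitOn '#' = List.modifyHead (List.cons c) (cs.splitOn '#') := by
        simp [List.splitOn, List.splitOnP_cons, hc]
      rw [this, ih, hTW, hDW]
      rfl

theorem pv_tilt_unfold (cs : List Char) :
    pvTilt cs = pvNorm (cs.takeWhile (· ≠ '#')) ++ pvTl cs := by
  rw [pvTilt, pv_splitOn_eq cs, pvTl]
  cases h : cs.dropWhile (· ≠ '#') with
  | nil => simp [PySem.Chars.join_singleton]
  | cons x r =>
    simp only [List.map_cons]
    rw [pv_splitOn_eq r, List.map_cons, PySem.Chars.join_cons_cons, ← List.map_cons, ← pv_splitOn_eq r]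
    simp [pvTilt]

theorem pv_load_cons (n : Nat) (off : Int) (c : Char) (l : List Char) :
    pvLoad n off (c :: l) = (if c = 'O' then (n : Int) - off else 0) + pvLoad n (off + 1) l := by
  simp [pvLoad, PySem.List.enumerate_cons]

theorem pv_load_nil (n : Nat) (off : Int) {l : List Char} (h : 'O' ∉ l) : pvLoad n off l = 0 := by
  induction l generalizing off with
  | nil => simp [pvLoad]
  | cons c t ih =>
    rw [pv_load_cons]
    have hc : c ≠ 'O' := by rintro rfl; exact h (List.mem_cons_self)
    simp [hc, ih (off + 1) (fun hm => h (List.mem_cons_of_mem _ hm))]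

theorem pv_load_append (n : Nat) (off : Int) (xs ys : List Char) :
    pvLoad n off (xs ++ ys) = pvLoad n off xs + pvLoad n (off + xs.length) ys := by
  induction xs generalizing off with
  | nil => simp [pvLoad]
  | cons c t ih =>
    simp only [List.cons_append, pv_load_cons, ih (off + 1), List.length_cons]
    push_cast
    ring_nf

theorem pv_drop_tail (A Y : List Char) (m : Nat) (h : A ≠ []) :
    (A.tail ++ Y).drop m = (A ++ Y).drop (m + 1) := by
  cases A with
  | nil => exact absurd rfl h
  | cons a A' => simp

theorem pv_mid_str (n : Nat) (cs' : List Char) :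
    ∀ k pend (start : Nat) (load : Int),
      (pvMid n cs' k pend start load).2.2
        = List.replicate (k + (cs'.takeWhile (· ≠ '#')).count 'O') 'O'
          ++ (pend ++ (cs'.takeWhile (· ≠ '#')).map pvSub).drop ((cs'.takeWhile (· ≠ '#')).count 'O')
          ++ pvTl cs' := by
  induction cs' with
  | nil =>
    intro k pend start load
    simp [pvMid, pvTl]
  | cons c rest ih =>
    intro k pend start load
    by_cases hO : c = 'O'
    · subst hO
      have h1 : ('O' :: rest).takeWhile (· ≠ '#') = 'O' :: rest.takeWhile (· ≠ '#') := by simp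
      have h2 : pvTl ('O' :: rest) = pvTl rest := by simp [pvTl, List.dropWhile_cons]
      rw [show pvMid n ('O' :: rest) k pend start load
            = pvMid n rest (k + 1) ((pend ++ ['.']).tail) start
                (load + ((n : Int) - ((start + k : Nat) : Int))) from by simp [pvMid]]
      rw [ih (k+1) _ start _, h1, h2]
      simp only [List.count_cons, List.map_cons]
      have hsub : pvSub 'O' = '.' := by simp [pvSub]
      rw [hsub]
      have : ((pend ++ ['.']).tail ++ (rest.takeWhile (· ≠ '#')).map pvSub).drop
                ((rest.takeWhile (· ≠ '#')).count 'O')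
           = ((pend ++ ['.']) ++ (rest.takeWhile (· ≠ '#')).map pvSub).drop
                ((rest.takeWhile (· ≠ '#')).count 'O' + 1) := by
        exact pv_drop_tail _ _ _ (by simp)
      rw [this]
      simp [List.append_assoc]
      omega
    · by_cases hH : c = '#'
      · subst hH
        have h2 : pvTl ('#' :: rest) = '#' :: pvTilt rest := by simp [pvTl, List.dropWhile_cons]
        rw [show pvMid n ('#' :: rest) k pend start load
              = ((pvMid n rest 0 [] (start + k + pend.length + 1) load).1,
                 (pvMid n rest 0 [] (start + k + pend.length + 1) load).2.1,
                 List.replicate k 'O' ++ pend ++ '#' ::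
                   (pvMid n rest 0 [] (start + k + pend.length + 1) load).2.2) from by simp [pvMid]]
        simp only []
        rw [ih 0 [] (start + k + pend.length + 1) load, h2, pv_tilt_unfold rest]
        simp [pvNorm, List.map_drop, List.takeWhile_cons]
      · have h1 : (c :: rest).takeWhile (· ≠ '#') = c :: rest.takeWhile (· ≠ '#') := by simp [hH]
        have h2 : pvTl (c :: rest) = pvTl rest := by simp [pvTl, List.dropWhile_cons, hH]
        rw [show pvMid n (c :: rest) k pend start load
              = pvMid n rest k (pend ++ [c]) start load from by simp [pvMid, hO, hH]]
        rw [ih k _ start load, h1, h2]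
        simp only [List.count_cons, List.map_cons]
        have hsub : pvSub c = c := by simp [pvSub, hO]
        rw [hsub]
        simp [hO, List.append_assoc]

theorem pv_drop_repl (m c : Nat) (Z : List Char) :
    (List.replicate (m + 1 + c) 'O' ++ Z).drop m
      = 'O' :: (List.replicate (m + 1 + c) 'O' ++ Z).drop (m + 1) := by
  rw [List.drop_append_of_le_length (by simp only [List.length_replicate]; omega),
      List.drop_append_of_le_length (by simp only [List.length_replicate]; omega),
      List.drop_replicate, List.drop_replicate]
  have h1 : m + 1 + c - m = c + 1 := by omega
  have h2 : m + 1 + c - (m + 1) = c := by omega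
  rw [h1, h2, List.replicate_succ]
  rfl

theorem pv_mid_load (n : Nat) (cs' : List Char) :
    ∀ k pend (start : Nat) (load : Int), 'O' ∉ pend →
      (pvMid n cs' k pend start load).2.1
        = load + pvLoad n ((start + k : Nat) : Int) ((pvMid n cs' k pend start load).2.2.drop k) := by
  induction cs' with
  | nil =>
    intro k pend start load hO
    have : (List.replicate k 'O' ++ pend).drop k = pend := by
      simpa using List.drop_left (l₁ := List.replicate k 'O') (l₂ := pend)
    simp [pvMid, this, pv_load_nil n _ hO]
  | cons c rest ih =>
    intro k pend start load hO
    by_cases hc : c = 'O'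
    · subst hc
      rw [show pvMid n ('O' :: rest) k pend start load
            = pvMid n rest (k + 1) ((pend ++ ['.']).tail) start
                (load + ((n : Int) - ((start + k : Nat) : Int))) from by simp [pvMid]]
      have hO' : 'O' ∉ (pend ++ ['.']).tail := by
        intro hm
        rcases List.mem_append.mp (List.mem_of_mem_tail hm) with h | h
        · exact hO h
        · simp at h
      rw [ih (k + 1) _ start _ hO']
      -- out.drop k = 'O' :: out.drop (k+1)
      have hout := pv_mid_str n rest (k + 1) ((pend ++ ['.']).tail) start
          (load + ((n : Int) - ((start + k : Nat) : Int)))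
      set out := (pvMid n rest (k + 1) ((pend ++ ['.']).tail) start
          (load + ((n : Int) - ((start + k : Nat) : Int)))).2.2 with hdef
      have hdropstep : out.drop k = 'O' :: out.drop (k + 1) := by
        rw [hout]
        have : k + 1 + (rest.takeWhile (· ≠ '#')).count 'O'
             = k + 1 + (rest.takeWhile (· ≠ '#')).count 'O' := rfl
        rw [show (k + 1 + (rest.takeWhile (· ≠ '#')).count 'O') = k + 1 + (rest.takeWhile (· ≠ '#')).count 'O' from rfl]
        rw [List.append_assoc]
        exact pv_drop_repl k _ _
      rw [hdropstep, pv_load_cons]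
      simp only [if_pos rfl]
      push_cast
      ring_nf
    · by_cases hH : c = '#'
      · subst hH
        rw [show pvMid n ('#' :: rest) k pend start load
              = ((pvMid n rest 0 [] (start + k + pend.length + 1) load).1,
                 (pvMid n rest 0 [] (start + k + pend.length + 1) load).2.1,
                 List.replicate k 'O' ++ pend ++ '#' ::
                   (pvMid n rest 0 [] (start + k + pend.length + 1) load).2.2) from by simp [pvMid]]
        rw [ih 0 [] (start + k + pend.length + 1) load (by simp)]
        have hdrop : (List.replicate k 'O' ++ pend ++ '#' ::
              (pvMid n rest 0 [] (start + k + pend.length + 1) load).2.2).drop k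
            = pend ++ '#' :: (pvMid n rest 0 [] (start + k + pend.length + 1) load).2.2 := by
          simpa using List.drop_left (l₁ := List.replicate k 'O')
            (l₂ := pend ++ '#' :: (pvMid n rest 0 [] (start + k + pend.length + 1) load).2.2)
        rw [hdrop, pv_load_append, pv_load_nil n _ hO, pv_load_cons]
        have hne : ('#' : Char) ≠ 'O' := by decide
        simp only [if_neg hne, List.drop_zero]
        push_cast
        ring_nf
      · rw [show pvMid n (c :: rest) k pend start load
              = pvMid n rest k (pend ++ [c]) start load from by simp [pvMid, hc, hH]]
        exact ih k (pend ++ [c]) start load (by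
          intro hm
          rcases List.mem_append.mp hm with h | h
          · exact hO h
          · simp at h; exact hc h.symm)

theorem pv_two_sets (d pend rest : List Char) (k : Nat) :
    PySem.List.pySetD
        (PySem.List.pySetD (d ++ List.replicate k 'O' ++ pend ++ 'O' :: rest)
          ((d.length + k + pend.length : Nat) : Int) '.')
        ((d.length + k : Nat) : Int) 'O'
      = d ++ List.replicate (k + 1) 'O' ++ (pend ++ ['.']).tail ++ rest := by
  rw [PySem.List.pySetD_natCast, PySem.List.pySetD_natCast]
  have e1 : d ++ List.replicate k 'O' ++ pend ++ 'O' :: rest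
      = (d ++ List.replicate k 'O' ++ pend) ++ 'O' :: rest := by simp
  rw [e1, show d.length + k + pend.length = (d ++ List.replicate k 'O' ++ pend).length from by simp only [List.length_append, List.length_replicate, Nat.add_assoc]]
  have h1 : ((d ++ List.replicate k 'O' ++ pend) ++ 'O' :: rest).set
      (d ++ List.replicate k 'O' ++ pend).length '.'
      = (d ++ List.replicate k 'O' ++ pend) ++ '.' :: rest := by simp
  rw [h1]
  cases pend with
  | nil =>
    have e2 : (d ++ List.replicate k 'O' ++ ([] : List Char)) ++ '.' :: rest
        = (d ++ List.replicate k 'O') ++ '.' :: rest := by simp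
    rw [e2, show d.length + k = (d ++ List.replicate k 'O').length from by simp only [List.length_append, List.length_replicate]]
    simp [List.replicate_succ']
  | cons p pt =>
    have e2 : (d ++ List.replicate k 'O' ++ (p :: pt)) ++ '.' :: rest
        = (d ++ List.replicate k 'O') ++ p :: (pt ++ '.' :: rest) := by simp
    rw [e2, show d.length + k = (d ++ List.replicate k 'O').length from by simp only [List.length_append, List.length_replicate]]
    simp [List.replicate_succ']

theorem pv_A_loop (input : List String) (column : Int) (n : Nat) (cs' : List Char) :
    ∀ (d : List Char) (k : Nat) (pend : List Char) (load : Int),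
      (∀ off, (h : off < cs'.length) →
        (PySem.Str.pyGet? (PySem.List.pyGetD input ((d.length + k + pend.length + off : Nat) : Int) "") column).getD ' '
          = cs'[off]) →
      (List.range' (d.length + k + pend.length) cs'.length).foldl (pvStepA input column n)
          (((d.length + k : Nat) : Int), load, d ++ List.replicate k 'O' ++ pend ++ cs')
        = ((((pvMid n cs' k pend d.length load).1 : Nat) : Int),
           (pvMid n cs' k pend d.length load).2.1,
           d ++ (pvMid n cs' k pend d.length load).2.2) := by
  induction cs' with
  | nil =>
    intro d k pend load _
    simp [pvMid]
  | cons c rest ih =>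
    intro d k pend load hrd
    rw [List.length_cons, List.range'_succ, List.foldl_cons]
    have hc0 := hrd 0 (by simp)
    simp only [List.getElem_cons_zero, Nat.add_zero] at hc0
    have hstep : pvStepA input column n
        (((d.length + k : Nat) : Int), load, d ++ List.replicate k 'O' ++ pend ++ c :: rest)
        (d.length + k + pend.length) =
      if c = 'O' then
        (((d.length + k : Nat) : Int) + 1, load + ((n : Int) - ((d.length + k : Nat) : Int)),
         PySem.List.pySetD (PySem.List.pySetD (d ++ List.replicate k 'O' ++ pend ++ c :: rest)
            ((d.length + k + pend.length : Nat) : Int) '.') ((d.length + k : Nat) : Int) 'O')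
      else if c = '#' then
        (((d.length + k + pend.length : Nat) : Int) + 1, load, d ++ List.replicate k 'O' ++ pend ++ c :: rest)
      else (((d.length + k : Nat) : Int), load, d ++ List.replicate k 'O' ++ pend ++ c :: rest) := by
      simp only [pvStepA, hc0]
    rw [hstep]
    by_cases hO : c = 'O'
    · subst hO
      rw [if_pos rfl]
      rw [show pvMid n ('O' :: rest) k pend d.length load
            = pvMid n rest (k + 1) ((pend ++ ['.']).tail) d.length
                (load + ((n : Int) - ((d.length + k : Nat) : Int))) from by simp [pvMid]]
      rw [pv_two_sets]
      have htail : ((pend ++ ['.']).tail).length = pend.length := by simp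
      have hIH := ih d (k + 1) ((pend ++ ['.']).tail)
          (load + ((n : Int) - ((d.length + k : Nat) : Int)))
          (by
            intro off hoff
            have h2 := hrd (off + 1) (by simpa using Nat.succ_lt_succ hoff)
            simp only [List.getElem_cons_succ] at h2
            have hidx : d.length + (k + 1) + ((pend ++ ['.']).tail).length + off
                = d.length + k + pend.length + (off + 1) := by
              simp only [List.length_tail, List.length_append, List.length_cons, List.length_nil]
              omega
            rw [hidx]
            exact h2)
      rw [htail] at hIH
      have harr : d.length + k + pend.length + 1 = d.length + (k + 1) + pend.length := by omega
      have hcast : ((d.length + k : Nat) : Int) + 1 = ((d.length + (k + 1) : Nat) : Int) := by push_cast; ring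
      rw [hcast, harr, hIH]
    · rw [if_neg hO]
      by_cases hH : c = '#'
      · subst hH
        rw [if_pos rfl]
        rw [show pvMid n ('#' :: rest) k pend d.length load
              = ((pvMid n rest 0 [] (d.length + k + pend.length + 1) load).1,
                 (pvMid n rest 0 [] (d.length + k + pend.length + 1) load).2.1,
                 List.replicate k 'O' ++ pend ++ '#' ::
                   (pvMid n rest 0 [] (d.length + k + pend.length + 1) load).2.2) from by simp [pvMid]]
        have hd' : (d ++ List.replicate k 'O' ++ pend ++ ['#']).length = d.length + k + pend.length + 1 := by
          simp only [List.length_append, List.length_replicate, List.length_cons, List.length_nil]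
        have hIH := ih (d ++ List.replicate k 'O' ++ pend ++ ['#']) 0 [] load
          (by
            intro off hoff
            have h2 := hrd (off + 1) (by simpa using Nat.succ_lt_succ hoff)
            simp only [List.getElem_cons_succ] at h2
            have hidx : (d ++ List.replicate k 'O' ++ pend ++ ['#']).length + 0 + ([] : List Char).length + off
                = d.length + k + pend.length + (off + 1) := by
              simp only [List.length_append, List.length_replicate, List.length_cons, List.length_nil]
              omega
            rw [hidx]
            exact h2)
        rw [hd'] at hIH
        simp only [List.append_nil, List.replicate_zero, List.nil_append, Nat.add_zero,
          List.length_nil] at hIH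
        have hcol : d ++ List.replicate k 'O' ++ pend ++ '#' :: rest
            = (d ++ List.replicate k 'O' ++ pend ++ ['#']) ++ rest := by simp
        have hcast : ((d.length + k + pend.length : Nat) : Int) + 1
            = ((d.length + k + pend.length + 1 : Nat) : Int) := by push_cast; ring
        rw [hcast, hcol, hIH]
        simp
      · rw [if_neg hH]
        rw [show pvMid n (c :: rest) k pend d.length load
              = pvMid n rest k (pend ++ [c]) d.length load from by simp [pvMid, hO, hH]]
        have hIH := ih d k (pend ++ [c]) load
          (by
            intro off hoff
            have h2 := hrd (off + 1) (by simpa using Nat.succ_lt_succ hoff)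
            simp only [List.getElem_cons_succ] at h2
            have hidx : d.length + k + (pend ++ [c]).length + off
                = d.length + k + pend.length + (off + 1) := by
              simp only [List.length_append, List.length_cons, List.length_nil]
              omega
            rw [hidx]
            exact h2)
        have hcol : d ++ List.replicate k 'O' ++ pend ++ c :: rest
            = d ++ List.replicate k 'O' ++ (pend ++ [c]) ++ rest := by simp
        have harr : d.length + k + pend.length + 1 = d.length + k + (pend ++ [c]).length := by
          simp only [List.length_append, List.length_cons, List.length_nil]
          omega
        rw [hcol, show d.length + k + pend.length + 1 = d.length + k + (pend ++ [c]).length from harr] at *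
        rw [hIH]

theorem pv_enum_foldl (n : Nat) (l : List Char) :
    ∀ (off : Int) (acc : Int),
      (PySem.List.enumerate l off).foldl
        (fun (acc : Int) p => if p.2 = 'O' then acc + ((n : Int) - p.1) else acc) acc
      = acc + pvLoad n off l := by
  induction l with
  | nil => intro off acc; simp [pvLoad]
  | cons c t ih =>
    intro off acc
    rw [PySem.List.enumerate_cons, List.foldl_cons]
    by_cases hc : c = 'O'
    · simp only [hc, if_true, eq_self_iff_true, if_pos]
      rw [ih (off + 1) (acc + ((n : Int) - off))]
      simp [pvLoad, PySem.List.enumerate_cons]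
      ring
    · simp only [if_neg (by simpa using hc)]
      rw [ih (off + 1) acc]
      simp [pvLoad, PySem.List.enumerate_cons, hc]

theorem pv_main (input : List String) (column : Int) :
    tilt_north_col input column = tilt_north_col_alt input column := by
  have hcol : (PySem.List.pyRange 0 ((input.length : Nat) : Int)).map
      (fun c => (PySem.Str.pyGet? (PySem.List.pyGetD input c "") column).getD ' ')
      = input.map (fun row => (PySem.Str.pyGet? row column).getD ' ') := by
    rw [PySem.List.pyRange_zero_natCast, List.map_map]
    apply List.ext_getElem (by simp)
    intro i h1 h2
    simp only [List.length_map] at h2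
    simp [List.getElem?_eq_getElem, h2]
  have hlen : (input.map (fun row => (PySem.Str.pyGet? row column).getD ' ')).length = input.length := by
    simp
  have hfold := pv_A_loop input column input.length
    (input.map (fun row => (PySem.Str.pyGet? row column).getD ' ')) [] 0 [] 0
    (by
      intro off hoff
      simp only [List.length_nil, Nat.add_zero, Nat.zero_add, List.length_map] at hoff ⊢
      simp [List.getElem?_eq_getElem, hoff])
  simp only [List.length_nil, Nat.add_zero, Nat.zero_add, List.nil_append,
    List.replicate_zero, Nat.cast_zero, hlen] at hfold
  have hOut : (pvMid input.length (input.map (fun row => (PySem.Str.pyGet? row column).getD ' ')) 0 [] 0 0).2.2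
      = pvTilt (input.map (fun row => (PySem.Str.pyGet? row column).getD ' ')) := by
    rw [pv_mid_str, pv_tilt_unfold]
    simp [pvNorm, List.map_drop]
  have hLoad := pv_mid_load input.length
    (input.map (fun row => (PySem.Str.pyGet? row column).getD ' ')) 0 [] 0 0 (by simp)
  simp only [Nat.add_zero, Nat.cast_zero, List.drop_zero, zero_add] at hLoad
  rw [hOut] at hLoad
  simp only [tilt_north_col, tilt_north_col_alt]
  rw [hcol]
  rw [PySem.List.pyRange_zero_natCast, List.foldl_map, List.range_eq_range']
  simp only [PySem.List.foldl_append_singleton_eq_map, List.nil_append]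
  rw [pv_enum_foldl input.length, zero_add]
  refine Eq.trans (congrArg (fun t : Int × Int × List Char => (t.2.1, String.mk t.2.2)) hfold) ?_
  rw [hLoad, hOut]
  exact rfl

-- ===== VERDICT (by name: the statement is the Claim_ definition above) =====
theorem tilt_north_col_spec : Claim_equal_tilt_north_col := by
  intro input column _ _
  show tilt_north_col input column = tilt_north_col_alt input column
  exact pv_main input column
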